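-- pv_equiv track=rewrite | github.com/StarsExpress/LeetCode-Repository | prefix_sum/max_frequency_score/max_frequency_score.py | maximize_frequency_score
-- ===== SOURCE A (Python) =====
-- def maximize_frequency_score(nums: list[int], limit: int) -> int:  # LeetCode Q.2968.
--     nums.sort()
--     prefix_sums = []
--     for num in nums:
--         if not prefix_sums:
--             prefix_sums.append(num)
--             continue
--         prefix_sums.append(prefix_sums[-1] + num)
--
--     max_score = 1  # Base case.
--
--     left_idx, mid_idx = 0, 0
--     for right_idx in range(len(nums)):
--         first_while = True
--         while True:
--             if not first_while:
--                 left_idx += 1  # Since 2nd while, the subarray left bound rises.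
--
--             # Always optimal to change all nums to the num at mid idx.
--             mid_idx = (left_idx + right_idx) // 2
--             operations = prefix_sums[right_idx] - prefix_sums[mid_idx]
--             operations -= nums[mid_idx] * (right_idx - mid_idx)
--
--             operations += nums[mid_idx] * (mid_idx - left_idx)
--             if mid_idx > 0:
--                 operations -= prefix_sums[mid_idx - 1]
--                 if left_idx > 0:
--                     operations += prefix_sums[left_idx - 1]
--
--             if limit >= operations or left_idx == right_idx:
--                 break
--             first_while = False
--
--         score = right_idx + 1 - left_idx
--         if score > max_score:
--             max_score = score
--
--     return max_score
-- ===== SOURCE B (Python) =====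
-- def maximize_frequency_score(nums: list[int], limit: int) -> int:  # LeetCode Q.2968.
--     nums.sort()
--     n = len(nums)
--     prefix = [0]
--     for x in nums:
--         prefix.append(prefix[-1] + x)
--
--     def cost(left, size):  # cost to equalize sorted window [left, left+size-1] at its median
--         mid = left + (size - 1) // 2
--         median = nums[mid]
--         low = median * (mid - left) - (prefix[mid] - prefix[left])
--         high = (prefix[left + size] - prefix[mid + 1]) - median * (left + size - 1 - mid)
--         return low + high
--
--     def feasible(size):
--         return any(cost(left, size) <= limit for left in range(n - size + 1))
--
--     ans, lo, hi = 1, 1, n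
--     while lo <= hi:
--         mid = (lo + hi) // 2
--         if feasible(mid):
--             ans, lo = mid, mid + 1
--         else:
--             hi = mid - 1
--     return ans
-- ===== Notes on version B (the rewrite author's own statement) =====
-- stated objective: alternative
-- what changed: Replaces A's amortized two-pointer sweep (left pointer advanced by an inner while over every right index, with a last-element-append prefix list and mid>0/left>0 guards) by binary search over the answer: a 0-prepended prefix-sum array, an O(1) median-cost kernel, a feasibility scan of all fixed-size windows, and a lo/hi binary search returning the largest feasible window length (baseline 1).
import Mathlib
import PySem

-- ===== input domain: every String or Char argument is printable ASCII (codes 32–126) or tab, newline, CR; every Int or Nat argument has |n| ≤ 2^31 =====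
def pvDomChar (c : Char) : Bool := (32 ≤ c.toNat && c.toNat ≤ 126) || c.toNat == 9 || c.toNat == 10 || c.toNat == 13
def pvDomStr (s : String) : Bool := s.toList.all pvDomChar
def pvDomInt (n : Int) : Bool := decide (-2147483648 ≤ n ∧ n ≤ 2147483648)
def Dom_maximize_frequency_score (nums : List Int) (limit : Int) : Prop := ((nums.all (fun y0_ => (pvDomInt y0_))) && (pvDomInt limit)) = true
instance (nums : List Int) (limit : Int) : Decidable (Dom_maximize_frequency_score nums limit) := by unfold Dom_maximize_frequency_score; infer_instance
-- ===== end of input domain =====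

-- B replaces A's amortized two-pointer sweep by binary search over the window length
-- (objective: alternative).  Both A and B sort `nums` in place in Python; the theorems
-- below are about the return value.

-- ===== PORT A =====
-- A builds prefix_sums by appending (first element plain, then last-element + num).
def pvPrefixA (nums : List Int) : List Int :=
  nums.foldl (fun acc num => if acc = [] then acc ++ [num] else acc ++ [acc.getLast! + num]) []

-- the `operations` expression of A's inner loop, with its mid>0 / left>0 guards.
-- All indices are provably in range (left ≤ mid ≤ right < len nums whenever used),
-- so List.getD _ 0 computes exactly what Python's indexing computes.
def pvOpsA (nums prefix_sums : List Int) (right left : Nat) : Int :=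
  let mid := (left + right) / 2
  let ops := prefix_sums.getD right 0 - prefix_sums.getD mid 0
    - nums.getD mid 0 * ((right : Int) - (mid : Int))
    + nums.getD mid 0 * ((mid : Int) - (left : Int))
  if mid > 0 then
    (if left > 0 then ops - prefix_sums.getD (mid - 1) 0 + prefix_sums.getD (left - 1) 0
     else ops - prefix_sums.getD (mid - 1) 0)
  else ops

-- A's `while True`: advance left until limit ≥ operations or left == right.
-- The final `else left` is a totality guard only; it is never reached (left ≤ right).
def pvAdvanceA (nums prefix_sums : List Int) (limit : Int) (right left : Nat) : Nat :=
  if limit ≥ pvOpsA nums prefix_sums right left ∨ left = right then left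
  else if _h : left < right then pvAdvanceA nums prefix_sums limit right (left + 1)
  else left
termination_by right - left

def maximize_frequency_score (nums : List Int) (limit : Int) : Int :=
  let nums := PySem.List.sorted nums (fun x => x) false
  let prefix_sums := pvPrefixA nums
  -- state: (left_idx, max_score); mid_idx is recomputed before every use.
  let st := (List.range nums.length).foldl (fun (st : Nat × Int) right =>
      let left := pvAdvanceA nums prefix_sums limit right st.1
      let score : Int := (right : Int) + 1 - (left : Int)
      (left, if score > st.2 then score else st.2)) (0, 1)
  st.2

-- ===== PORT B =====
-- B's prefix list starts with a 0 sentinel: pre[i] = sum of the first i elements.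
def pvPrefixB (nums : List Int) : List Int :=
  nums.foldl (fun acc x => acc ++ [acc.getLast! + x]) [0]

-- cost to equalize the sorted window [left, left+size-1] at its median.
-- Indices are in range whenever B calls this (1 ≤ size, left+size ≤ len nums).
def pvCostB (nums pre : List Int) (left size : Nat) : Int :=
  let mid := left + (size - 1) / 2
  let median := nums.getD mid 0
  let low := median * ((mid : Int) - (left : Int)) - (pre.getD mid 0 - pre.getD left 0)
  let high := (pre.getD (left + size) 0 - pre.getD (mid + 1) 0)
    - median * ((left : Int) + (size : Int) - 1 - (mid : Int))
  low + high

def pvFeasibleB (nums pre : List Int) (limit : Int) (n size : Nat) : Bool :=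
  (List.range (n - size + 1)).any (fun left => pvCostB nums pre left size ≤ limit)

-- binary search for the largest feasible window length; `fuel` is a totality guard
-- (the wrapper passes n+1, strictly more than the hi+1-lo iterations possible).
def pvSearchB (nums pre : List Int) (limit : Int) (n : Nat) (fuel ans lo hi : Nat) : Nat :=
  match fuel with
  | 0 => ans
  | fuel + 1 =>
    if lo ≤ hi then
      let mid := (lo + hi) / 2
      if pvFeasibleB nums pre limit n mid then
        pvSearchB nums pre limit n fuel mid (mid + 1) hi
      else
        pvSearchB nums pre limit n fuel ans lo (mid - 1)
    else ans

def maximize_frequency_score_alt (nums : List Int) (limit : Int) : Int :=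
  let nums := PySem.List.sorted nums (fun x => x) false
  let n := nums.length
  let pre := pvPrefixB nums
  (pvSearchB nums pre limit n (n + 1) 1 1 n : Int)

-- ===== PRECONDITION & SPEC =====
def Spec_maximize_frequency_score (nums : List Int) (limit : Int) (out : Int) : Prop := out = maximize_frequency_score_alt nums limit
instance (nums : List Int) (limit : Int) (out : Int) : Decidable (Spec_maximize_frequency_score nums limit out) := by unfold Spec_maximize_frequency_score; infer_instance

-- ===== CLAIM (what is proved, stated in full; the proofs are below) =====
def Claim_equal_maximize_frequency_score : Prop := ∀ (nums : List Int) (limit : Int), Dom_maximize_frequency_score nums limit → Spec_maximize_frequency_score nums limit (maximize_frequency_score nums limit)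

-- ===== LEMMAS AND PROOFS =====

-- element and prefix-sum abbreviations over the sorted list s
def pvE (s : List Int) (i : Nat) : Int := s.getD i 0
def pvT (s : List Int) (i : Nat) : Int := (s.take i).sum

-- canonical "pairing" cost of window [l, r]: sum of (e (r-j) - e (l+j)) over the outer pairs
def pvC (s : List Int) (l r : Nat) : Int :=
  ∑ j ∈ Finset.range ((r + 1 - l) / 2), (pvE s (r - j) - pvE s (l + j))

theorem pvT_succ (s : List Int) (i : Nat) : pvT s (i + 1) = pvT s i + pvE s i := by
  unfold pvT pvE
  rcases Nat.lt_or_ge i s.length with h | h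
  · rw [List.sum_take_succ _ i h, List.getD_eq_getElem s 0 h]
  · rw [List.take_of_length_le (by omega), List.take_of_length_le h,
      List.getD_eq_getElem?_getD, List.getElem?_eq_none (by omega)]
    simp

theorem pvT_zero (s : List Int) : pvT s 0 = 0 := rfl

theorem pvT_cons (x : Int) (xs : List Int) (i : Nat) : pvT (x :: xs) (i + 1) = x + pvT xs i := by
  simp [pvT]

-- the running-sum list both prefix builders produce
def pvScan (c : Int) : List Int → List Int
  | [] => []
  | x :: xs => (c + x) :: pvScan (c + x) xs

theorem pvScan_getD (c : Int) (l : List Int) (i : Nat) (h : i < l.length) :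
    (pvScan c l).getD i 0 = c + pvT l (i + 1) := by
  induction l generalizing c i with
  | nil => simp at h
  | cons x xs ih =>
    cases i with
    | zero => simp [pvScan, pvT_cons, pvT_zero]
    | succ i =>
      simp only [pvScan, List.getD_cons_succ]
      rw [ih (c + x) i (by simpa using h), pvT_cons]
      ring

theorem pvGetLast!_singleton (y : Int) : ([y] : List Int).getLast! = y := by
  rw [List.getLast!_eq_getLast?_getD]; rfl

theorem pvGetLast!_append (acc : List Int) (y : Int) : (acc ++ [y]).getLast! = y := by
  rw [List.getLast!_eq_getLast?_getD]; simp

theorem pvFoldStep (l acc : List Int) (hne : acc ≠ []) :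
    l.foldl (fun acc x => acc ++ [acc.getLast! + x]) acc = acc ++ pvScan acc.getLast! l := by
  induction l generalizing acc with
  | nil => simp [pvScan]
  | cons x xs ih =>
    simp only [List.foldl_cons, pvScan]
    rw [ih (acc ++ [acc.getLast! + x]) (by simp), pvGetLast!_append]
    simp

theorem pvFoldAB (l acc : List Int) (hne : acc ≠ []) :
    l.foldl (fun acc num => if acc = [] then acc ++ [num] else acc ++ [acc.getLast! + num]) acc
      = l.foldl (fun acc x => acc ++ [acc.getLast! + x]) acc := by
  induction l generalizing acc with
  | nil => rfl
  | cons x xs ih =>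
    simp only [List.foldl_cons, if_neg hne]
    exact ih (acc ++ [acc.getLast! + x]) (by simp)

-- pre-list characterizations
theorem pvPrefixA_eq (s : List Int) : pvPrefixA s = (match s with | [] => [] | x :: xs => x :: pvScan x xs) := by
  cases s with
  | nil => rfl
  | cons x xs =>
    unfold pvPrefixA
    simp only [List.foldl_cons, if_true, List.nil_append]
    rw [pvFoldAB xs [x] (by simp), pvFoldStep xs [x] (by simp), pvGetLast!_singleton]
    rfl

theorem pvPrefixA_getD (s : List Int) (i : Nat) (h : i < s.length) :
    (pvPrefixA s).getD i 0 = pvT s (i + 1) := by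
  rw [pvPrefixA_eq]
  cases s with
  | nil => simp at h
  | cons x xs =>
    cases i with
    | zero => simp [pvT_cons, pvT_zero]
    | succ i =>
      simp only [List.getD_cons_succ]
      rw [pvScan_getD x xs i (by simpa using h), pvT_cons]

theorem pvPrefixB_getD (s : List Int) (i : Nat) (h : i ≤ s.length) :
    (pvPrefixB s).getD i 0 = pvT s i := by
  unfold pvPrefixB
  rw [pvFoldStep s [0] (by simp), pvGetLast!_singleton]
  cases i with
  | zero => simp [pvT_zero]
  | succ i =>
    simp only [List.cons_append, List.nil_append, List.getD_cons_succ]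
    rw [pvScan_getD 0 s i (by omega)]
    ring

theorem pvSumTop (s : List Int) (r h : Nat) (hh : h ≤ r + 1) :
    ∑ j ∈ Finset.range h, pvE s (r - j) = pvT s (r + 1) - pvT s (r + 1 - h) := by
  induction h with
  | zero => simp
  | succ h ih =>
    rw [Finset.sum_range_succ, ih (by omega), show r + 1 - h = (r - h) + 1 from by omega,
      show r + 1 - (h + 1) = r - h from by omega]
    have h1 := pvT_succ s (r - h)
    omega

theorem pvSumBot (s : List Int) (l h : Nat) :
    ∑ j ∈ Finset.range h, pvE s (l + j) = pvT s (l + h) - pvT s l := by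
  induction h with
  | zero => simp
  | succ h ih =>
    rw [Finset.sum_range_succ, ih, show l + (h + 1) = (l + h) + 1 from rfl, pvT_succ]
    ring

-- the canonical prefix-sum form of the pairing cost
theorem pvC_formula (s : List Int) (l r : Nat) (hlr : l ≤ r) :
    pvC s l r = pvT s (r + 1) - pvT s ((l + r) / 2 + 1) - pvT s ((l + r) / 2) + pvT s l
      + pvE s ((l + r) / 2) * (2 * (((l + r) / 2 : Nat) : Int) - (l : Int) - (r : Int)) := by
  unfold pvC
  rw [Finset.sum_sub_distrib, pvSumTop s r _ (by omega), pvSumBot]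
  have hm1 : r + 1 - (r + 1 - l) / 2 = (l + r) / 2 + 1 := by omega
  rcases Nat.even_or_odd (l + r) with ⟨t, ht⟩ | ⟨t, ht⟩
  · have h2 : l + (r + 1 - l) / 2 = (l + r) / 2 := by omega
    have h3 : (2 * (((l + r) / 2 : Nat) : Int) - (l : Int) - (r : Int)) = 0 := by omega
    rw [hm1, h2, h3]; ring
  · have h2 : l + (r + 1 - l) / 2 = (l + r) / 2 + 1 := by omega
    have h3 : (2 * (((l + r) / 2 : Nat) : Int) - (l : Int) - (r : Int)) = -1 := by omega
    have h4 := pvT_succ s ((l + r) / 2)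
    rw [hm1, h2, h3]
    omega

-- both cost kernels equal the pairing cost (pure prefix-sum algebra, no sortedness)
theorem pvOpsA_eq_pvC (s : List Int) (l r : Nat) (hlr : l ≤ r) (hr : r < s.length) :
    pvOpsA s (pvPrefixA s) r l = pvC s l r := by
  have hm_lt : (l + r) / 2 < s.length := by omega
  rw [pvC_formula s l r hlr]
  simp only [pvOpsA]
  rw [pvPrefixA_getD s r hr, pvPrefixA_getD s ((l + r) / 2) hm_lt]
  by_cases hm : (l + r) / 2 > 0
  · rw [if_pos hm, pvPrefixA_getD s ((l + r) / 2 - 1) (by omega),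
      show (l + r) / 2 - 1 + 1 = (l + r) / 2 from by omega]
    by_cases hl : l > 0
    · rw [if_pos hl, pvPrefixA_getD s (l - 1) (by omega), show l - 1 + 1 = l from by omega]
      unfold pvE; ring
    · rw [if_neg hl]
      have hl0 : l = 0 := by omega
      subst hl0
      rw [pvT_zero]
      unfold pvE; ring
  · rw [if_neg hm]
    have hm0 : (l + r) / 2 = 0 := by omega
    have hl0 : l = 0 := by omega
    subst hl0
    rw [hm0, pvT_zero]
    unfold pvE; ring

theorem pvCostB_eq_pvC (s : List Int) (l k : Nat) (hk : 1 ≤ k) (h : l + k ≤ s.length) :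
    pvCostB s (pvPrefixB s) l k = pvC s l (l + k - 1) := by
  rw [pvC_formula s l (l + k - 1) (by omega),
    show (l + (l + k - 1)) / 2 = l + (k - 1) / 2 from by omega]
  simp only [pvCostB]
  rw [pvPrefixB_getD s (l + (k - 1) / 2) (by omega), pvPrefixB_getD s l (by omega),
    pvPrefixB_getD s (l + k) h, pvPrefixB_getD s (l + (k - 1) / 2 + 1) (by omega),
    show l + k - 1 + 1 = l + k from by omega,
    show l + k - 1 = l + (k - 1) from by omega]
  unfold pvE
  push_cast [Nat.cast_sub hk]
  ring

-- sortedness gives monotone elements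
def pvSortedLE (s : List Int) : Prop := s.Pairwise (· ≤ ·)

theorem pvE_mono (s : List Int) (hs : pvSortedLE s) (i j : Nat) (hij : i ≤ j) (hj : j < s.length) :
    pvE s i ≤ pvE s j := by
  rcases Nat.lt_or_ge i j with hlt | hge
  · have hi : i < s.length := by omega
    unfold pvE
    rw [List.getD_eq_getElem s 0 hi, List.getD_eq_getElem s 0 hj]
    exact List.pairwise_iff_getElem.mp hs i j hi hj hlt
  · have hij' : i = j := by omega
    subst hij'; exact le_refl _

theorem pvSum_mono (f g : Nat → Int) (h' h : Nat) (hh : h' ≤ h)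
    (hg : ∀ j, j < h' → g j ≤ f j) (hf : ∀ j, j < h → 0 ≤ f j) :
    ∑ j ∈ Finset.range h', g j ≤ ∑ j ∈ Finset.range h, f j := by
  calc ∑ j ∈ Finset.range h', g j ≤ ∑ j ∈ Finset.range h', f j := by
        apply Finset.sum_le_sum; intro i hi; exact hg i (Finset.mem_range.mp hi)
    _ ≤ ∑ j ∈ Finset.range h, f j := by
        apply Finset.sum_le_sum_of_subset_of_nonneg
        · intro x hx
          rw [Finset.mem_range] at hx ⊢
          omega
        · intro i hi _
          exact hf i (Finset.mem_range.mp hi)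

-- window monotonicity of the pairing cost
theorem pvC_extend_right (s : List Int) (hs : pvSortedLE s) (l r : Nat)
    (hlr : l ≤ r) (hr : r + 1 < s.length) : pvC s l r ≤ pvC s l (r + 1) := by
  unfold pvC
  apply pvSum_mono _ _ _ _ (by omega)
  · intro j hj
    have h1 := pvE_mono s hs (r - j) (r + 1 - j) (by omega) (by omega)
    omega
  · intro j hj
    have h1 := pvE_mono s hs (l + j) (r + 1 - j) (by omega) (by omega)
    omega

theorem pvC_chain (s : List Int) (hs : pvSortedLE s) (l r d : Nat)
    (hlr : l ≤ r) (h : r + d < s.length) : pvC s l r ≤ pvC s l (r + d) := by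
  induction d with
  | zero => exact le_refl _
  | succ d ih =>
    calc pvC s l r ≤ pvC s l (r + d) := ih (by omega)
      _ ≤ pvC s l (r + d + 1) := pvC_extend_right s hs l (r + d) (by omega) (by omega)

theorem pvC_shrink_right (s : List Int) (hs : pvSortedLE s) (l r r' : Nat)
    (hlr : l ≤ r) (hrr : r ≤ r') (hr : r' < s.length) : pvC s l r ≤ pvC s l r' := by
  have h1 := pvC_chain s hs l r (r' - r) hlr (by omega)
  rwa [show r + (r' - r) = r' from by omega] at h1

-- the minimal stopping point of A's inner loop at a given right index
def pvLeftStar (s : List Int) (limit : Int) (r : Nat) : Nat :=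
  Nat.find (p := fun l => pvC s l r ≤ limit ∨ l = r) ⟨r, Or.inr rfl⟩

-- the feasibility predicate and the optimal window length K
abbrev pvFeas (s : List Int) (limit : Int) (k : Nat) : Prop :=
  1 ≤ k ∧ ∃ l ∈ Finset.range (s.length - k + 1), pvC s l (l + k - 1) ≤ limit

def pvK (s : List Int) (limit : Int) : Nat := Nat.findGreatest (pvFeas s limit) s.length

-- basic facts about pvLeftStar
theorem pvLeftStar_le (s : List Int) (limit : Int) (r : Nat) : pvLeftStar s limit r ≤ r :=
  Nat.find_le (Or.inr rfl)

theorem pvLeftStar_spec (s : List Int) (limit : Int) (r : Nat) :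
    pvC s (pvLeftStar s limit r) r ≤ limit ∨ pvLeftStar s limit r = r :=
  Nat.find_spec (p := fun l => pvC s l r ≤ limit ∨ l = r) ⟨r, Or.inr rfl⟩

theorem pvLeftStar_min (s : List Int) (limit : Int) (r l : Nat) (h : l < pvLeftStar s limit r) :
    ¬(pvC s l r ≤ limit ∨ l = r) :=
  Nat.find_min _ h

theorem pvLeftStar_le_of (s : List Int) (limit : Int) (r l : Nat)
    (h : pvC s l r ≤ limit ∨ l = r) : pvLeftStar s limit r ≤ l :=
  Nat.find_le h

theorem pvLeftStar_mono (s : List Int) (hs : pvSortedLE s) (limit : Int) (r : Nat)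
    (hr : r + 1 < s.length) : pvLeftStar s limit r ≤ pvLeftStar s limit (r + 1) := by
  by_contra hcon
  push_neg at hcon
  have hlr := pvLeftStar_le s limit r
  rcases pvLeftStar_spec s limit (r + 1) with hc | he
  · have hC : pvC s (pvLeftStar s limit (r + 1)) r ≤ limit ∨ pvLeftStar s limit (r + 1) = r := by
      by_cases heq : pvLeftStar s limit (r + 1) = r
      · exact Or.inr heq
      · left
        calc pvC s (pvLeftStar s limit (r + 1)) r
            ≤ pvC s (pvLeftStar s limit (r + 1)) (r + 1) :=
              pvC_extend_right s hs _ r (by omega) hr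
          _ ≤ limit := hc
    have := pvLeftStar_le_of s limit r _ hC
    omega
  · omega

-- A's inner while loop stops exactly at pvLeftStar
theorem pvAdvanceA_eq_aux (s : List Int) (limit : Int) (r : Nat) (hr : r < s.length) :
    ∀ d l0, l0 ≤ pvLeftStar s limit r → pvLeftStar s limit r - l0 = d →
      pvAdvanceA s (pvPrefixA s) limit r l0 = pvLeftStar s limit r := by
  intro d
  induction d with
  | zero =>
    intro l0 hle hd
    have heq : l0 = pvLeftStar s limit r := by omega
    have hl0r : l0 ≤ r := by have := pvLeftStar_le s limit r; omega
    rw [pvAdvanceA]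
    have hcond : limit ≥ pvOpsA s (pvPrefixA s) r l0 ∨ l0 = r := by
      rcases pvLeftStar_spec s limit r with h | h
      · left; rw [pvOpsA_eq_pvC s l0 r hl0r hr, heq]; exact h
      · right; omega
    rw [if_pos hcond]
    exact heq
  | succ d ih =>
    intro l0 hle hd
    have hlt : l0 < pvLeftStar s limit r := by omega
    have hnot := pvLeftStar_min s limit r l0 hlt
    have hlr := pvLeftStar_le s limit r
    have hl0r : l0 < r := by
      rcases Nat.lt_or_ge l0 r with h | h
      · exact h
      · exfalso; omega
    rw [pvAdvanceA]
    have hcond : ¬(limit ≥ pvOpsA s (pvPrefixA s) r l0 ∨ l0 = r) := by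
      rw [pvOpsA_eq_pvC s l0 r (by omega) hr]
      simpa [ge_iff_le] using hnot
    rw [if_neg hcond, dif_pos hl0r]
    exact ih (l0 + 1) (by omega) (by omega)

theorem pvAdvanceA_eq (s : List Int) (limit : Int) (r : Nat) (hr : r < s.length)
    (l0 : Nat) (hle : l0 ≤ pvLeftStar s limit r) :
    pvAdvanceA s (pvPrefixA s) limit r l0 = pvLeftStar s limit r :=
  pvAdvanceA_eq_aux s limit r hr _ l0 hle rfl

-- pvK facts
theorem pvK_le (s : List Int) (limit : Int) : pvK s limit ≤ s.length :=
  Nat.findGreatest_le _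

theorem pvFeas_mono (s : List Int) (hs : pvSortedLE s) (limit : Int) (k k' : Nat)
    (h1 : 1 ≤ k') (hk : k' ≤ k) (hkn : k ≤ s.length) (hf : pvFeas s limit k) : pvFeas s limit k' := by
  obtain ⟨hk1, l, hl, hC⟩ := hf
  rw [Finset.mem_range] at hl
  refine ⟨h1, ⟨l, ?_, ?_⟩⟩
  · rw [Finset.mem_range]; omega
  · calc pvC s l (l + k' - 1) ≤ pvC s l (l + k - 1) :=
        pvC_shrink_right s hs l _ _ (by omega) (by omega) (by omega)
    _ ≤ limit := hC

theorem pvFeas_le_K (s : List Int) (limit : Int) (k : Nat) (hkn : k ≤ s.length)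
    (hf : pvFeas s limit k) : k ≤ pvK s limit :=
  Nat.le_findGreatest hkn hf

theorem pvK_feas (s : List Int) (limit : Int) (h : 0 < pvK s limit) :
    pvFeas s limit (pvK s limit) := by
  have hne : ¬(Nat.findGreatest (pvFeas s limit) s.length = 0) := by
    unfold pvK at h; omega
  rw [Nat.findGreatest_eq_zero_iff] at hne
  push_neg at hne
  obtain ⟨m, hm0, hmn, hPm⟩ := hne
  exact Nat.findGreatest_spec hmn hPm

theorem pvLe_K_feas (s : List Int) (hs : pvSortedLE s) (limit : Int) (k : Nat)
    (h1 : 1 ≤ k) (hk : k ≤ pvK s limit) : pvFeas s limit k := by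
  have hKpos : 0 < pvK s limit := by omega
  exact pvFeas_mono s hs limit (pvK s limit) k h1 hk (pvK_le s limit) (pvK_feas s limit hKpos)

-- B's feasibility scan decides pvFeas
theorem pvFeasibleB_iff (s : List Int) (limit : Int) (k : Nat) (h1 : 1 ≤ k) (hkn : k ≤ s.length) :
    pvFeasibleB s (pvPrefixB s) limit s.length k = true ↔ pvFeas s limit k := by
  unfold pvFeasibleB pvFeas
  rw [List.any_eq_true]
  constructor
  · rintro ⟨l, hl, hp⟩
    rw [List.mem_range] at hl
    rw [decide_eq_true_iff] at hp
    refine ⟨h1, ⟨l, Finset.mem_range.mpr hl, ?_⟩⟩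
    rw [← pvCostB_eq_pvC s l k h1 (by omega)]
    exact hp
  · rintro ⟨-, l, hl, hC⟩
    rw [Finset.mem_range] at hl
    refine ⟨l, List.mem_range.mpr hl, ?_⟩
    rw [decide_eq_true_iff, pvCostB_eq_pvC s l k h1 (by omega)]
    exact hC

-- B's binary search returns max 1 K
theorem pvSearchB_eq (s : List Int) (hs : pvSortedLE s) (limit : Int) :
    ∀ fuel ans lo hi, 1 ≤ lo → hi ≤ s.length → pvK s limit ≤ hi →
      ans = max 1 (min (pvK s limit) (lo - 1)) → hi + 1 - lo < fuel →
      pvSearchB s (pvPrefixB s) limit s.length fuel ans lo hi = max 1 (pvK s limit) := by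
  intro fuel
  induction fuel with
  | zero => intro ans lo hi _ _ _ _ hf; omega
  | succ fuel ih =>
    intro ans lo hi hlo hhi hK hans hf
    rw [pvSearchB]
    by_cases hcmp : lo ≤ hi
    · rw [if_pos hcmp]
      have hmid1 : lo ≤ (lo + hi) / 2 := by omega
      have hmid2 : (lo + hi) / 2 ≤ hi := by omega
      by_cases hfeas : pvFeasibleB s (pvPrefixB s) limit s.length ((lo + hi) / 2) = true
      · rw [if_pos hfeas]
        have hfm : pvFeas s limit ((lo + hi) / 2) :=
          (pvFeasibleB_iff s limit _ (by omega) (by omega)).mp hfeas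
        have hmK : (lo + hi) / 2 ≤ pvK s limit := pvFeas_le_K s limit _ (by omega) hfm
        exact ih _ _ hi (by omega) hhi hK (by omega) (by omega)
      · rw [if_neg hfeas]
        have hKmid : pvK s limit < (lo + hi) / 2 := by
          by_contra hcon
          push_neg at hcon
          exact hfeas ((pvFeasibleB_iff s limit _ (by omega) (by omega)).mpr
            (pvLe_K_feas s hs limit _ (by omega) hcon))
        exact ih ans lo _ hlo (by omega) (by omega) hans (by omega)
    · rw [if_neg hcmp]
      omega

-- A's outer loop as a named fold
def pvStepA (s P : List Int) (limit : Int) (st : Nat × Int) (right : Nat) : Nat × Int :=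
  let left := pvAdvanceA s P limit right st.1
  let score : Int := (right : Int) + 1 - (left : Int)
  (left, if score > st.2 then score else st.2)

def pvFoldA (s : List Int) (limit : Int) (r : Nat) : Nat × Int :=
  (List.range r).foldl (pvStepA s (pvPrefixA s) limit) (0, 1)

-- every window A scores is feasible, so each score is at most max 1 K
theorem pvScore_le (s : List Int) (limit : Int) (r : Nat) (hr : r < s.length) :
    r + 1 - pvLeftStar s limit r ≤ max 1 (pvK s limit) := by
  by_cases heq : pvLeftStar s limit r = r
  · omega
  · have hlr := pvLeftStar_le s limit r
    have hC : pvC s (pvLeftStar s limit r) r ≤ limit := by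
      rcases pvLeftStar_spec s limit r with h | h
      · exact h
      · exact absurd h heq
    have hfeas : pvFeas s limit (r + 1 - pvLeftStar s limit r) := by
      refine ⟨by omega, ⟨pvLeftStar s limit r, ?_, ?_⟩⟩
      · rw [Finset.mem_range]; omega
      · rw [show pvLeftStar s limit r + (r + 1 - pvLeftStar s limit r) - 1 = r from by omega]
        exact hC
    have := pvFeas_le_K s limit _ (by omega) hfeas
    omega

theorem pvFoldA_inv (s : List Int) (hs : pvSortedLE s) (limit : Int) :
    ∀ r, r ≤ s.length →
      (pvFoldA s limit r).1 = (if r = 0 then 0 else pvLeftStar s limit (r - 1))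
      ∧ 1 ≤ (pvFoldA s limit r).2
      ∧ (pvFoldA s limit r).2 ≤ ((max 1 (pvK s limit) : Nat) : Int)
      ∧ ∀ r' < r, ((r' : Int) + 1 - (pvLeftStar s limit r' : Int)) ≤ (pvFoldA s limit r).2 := by
  intro r
  induction r with
  | zero =>
    intro _
    refine ⟨rfl, le_refl _, ?_, ?_⟩
    · have : 1 ≤ max 1 (pvK s limit) := by omega
      show (1 : Int) ≤ _
      omega
    · intro r' hr'; omega
  | succ r ih =>
    intro hr1
    obtain ⟨ih1, ih2, ih3, ih4⟩ := ih (by omega)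
    have hrn : r < s.length := by omega
    have hfold : pvFoldA s limit (r + 1) = pvStepA s (pvPrefixA s) limit (pvFoldA s limit r) r := by
      unfold pvFoldA
      rw [List.range_succ, List.foldl_append]
      rfl
    have hstle : (pvFoldA s limit r).1 ≤ pvLeftStar s limit r := by
      rw [ih1]
      by_cases h0 : r = 0
      · rw [if_pos h0]; omega
      · rw [if_neg h0]
        have hm := pvLeftStar_mono s hs limit (r - 1) (by omega)
        rwa [show r - 1 + 1 = r from by omega] at hm
    have hadv : pvAdvanceA s (pvPrefixA s) limit r (pvFoldA s limit r).1 = pvLeftStar s limit r :=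
      pvAdvanceA_eq s limit r hrn _ hstle
    have hLr := pvLeftStar_le s limit r
    have hscore := pvScore_le s limit r hrn
    rw [hfold]
    simp only [pvStepA, hadv]
    refine ⟨?_, ?_, ?_, ?_⟩
    · simp
    · split_ifs with hgt
      · omega
      · exact ih2
    · split_ifs with hgt
      · omega
      · exact ih3
    · intro r' hr'
      rcases Nat.lt_or_ge r' r with hlt | hge
      · have := ih4 r' hlt
        split_ifs with hgt
        · omega
        · omega
      · have hr'r : r' = r := by omega
        subst hr'r
        split_ifs with hgt
        · omega
        · omega

theorem maximize_frequency_score_eq (nums : List Int) (limit : Int) :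
    maximize_frequency_score nums limit =
      ((max 1 (pvK (PySem.List.sorted nums (fun x => x) false) limit) : Nat) : Int) := by
  have hs : pvSortedLE (PySem.List.sorted nums (fun x => x) false) := by
    unfold pvSortedLE
    exact PySem.List.sorted_pairwise nums (fun x => x)
  set s := PySem.List.sorted nums (fun x => x) false with hsdef
  show (pvFoldA s limit s.length).2 = _
  obtain ⟨h1, h2, h3, h4⟩ := pvFoldA_inv s hs limit s.length (le_refl _)
  rcases Nat.eq_zero_or_pos (pvK s limit) with hK0 | hKpos
  · rw [hK0] at h3 ⊢
    omega
  · obtain ⟨-, l, hl, hC⟩ := pvK_feas s limit hKpos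
    rw [Finset.mem_range] at hl
    have hKn := pvK_le s limit
    have hrn : l + pvK s limit - 1 < s.length := by omega
    have hLle : pvLeftStar s limit (l + pvK s limit - 1) ≤ l :=
      pvLeftStar_le_of s limit _ l (Or.inl hC)
    have h4' := h4 (l + pvK s limit - 1) hrn
    omega

theorem maximize_frequency_score_alt_eq (nums : List Int) (limit : Int) :
    maximize_frequency_score_alt nums limit =
      ((max 1 (pvK (PySem.List.sorted nums (fun x => x) false) limit) : Nat) : Int) := by
  have hs : pvSortedLE (PySem.List.sorted nums (fun x => x) false) := by
    unfold pvSortedLE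
    exact PySem.List.sorted_pairwise nums (fun x => x)
  set s := PySem.List.sorted nums (fun x => x) false with hsdef
  show ((pvSearchB s (pvPrefixB s) limit s.length (s.length + 1) 1 1 s.length : Nat) : Int) = _
  rw [pvSearchB_eq s hs limit (s.length + 1) 1 1 s.length (le_refl 1) (le_refl _)
    (pvK_le s limit) (by omega) (by omega)]

-- ===== VERDICT (by name: the statement is the Claim_ definition above) =====
theorem maximize_frequency_score_spec : Claim_equal_maximize_frequency_score := by
  intro nums limit _
  unfold Spec_maximize_frequency_score
  rw [maximize_frequency_score_eq, maximize_frequency_score_alt_eq]
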